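-- pv_equiv track=rewrite | github.com/danielewhughes/final_year_project | Dissertation/metrics/semantics/bertscore.py | split_into_songs
-- ===== SOURCE A (Python) =====
-- def split_into_songs(lines):
--     songs = []
--     current_song = []
--     for line in lines:
--         if "*" in line.strip():
--             if current_song:
--                 songs.append(current_song)
--                 current_song = []
--         else:
--             if line.strip():  # Only add non-blank lines
--                 current_song.append(line.strip())
--     if current_song:
--         songs.append(current_song)
--     return songs
-- ===== SOURCE B (Python) =====
-- def split_into_songs(lines):
--     # Segment-then-filter decomposition: pre-strip once, then scan maximal
--     # runs of non-delimiter lines; each run's non-blank lines form a song.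
--     ls = [l.strip() for l in lines]
--     n = len(ls)
--     songs = []
--     i = 0
--     while i < n:
--         if "*" in ls[i]:
--             i += 1
--             continue
--         j = i
--         while j < n and "*" not in ls[j]:
--             j += 1
--         song = [s for s in ls[i:j] if s]
--         if song:
--             songs.append(song)
--         i = j
--     return songs
-- ===== Notes on version B (the rewrite author's own statement) =====
-- stated objective: alternative
-- what changed: Replaces the single accumulator-threading pass (current_song built line by line, flushed at delimiters and at the end) by a segment-then-filter decomposition: strip all lines once, scan maximal '*'-free runs, and emit the non-blank lines of each non-empty run as a song.
import Mathlib
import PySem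

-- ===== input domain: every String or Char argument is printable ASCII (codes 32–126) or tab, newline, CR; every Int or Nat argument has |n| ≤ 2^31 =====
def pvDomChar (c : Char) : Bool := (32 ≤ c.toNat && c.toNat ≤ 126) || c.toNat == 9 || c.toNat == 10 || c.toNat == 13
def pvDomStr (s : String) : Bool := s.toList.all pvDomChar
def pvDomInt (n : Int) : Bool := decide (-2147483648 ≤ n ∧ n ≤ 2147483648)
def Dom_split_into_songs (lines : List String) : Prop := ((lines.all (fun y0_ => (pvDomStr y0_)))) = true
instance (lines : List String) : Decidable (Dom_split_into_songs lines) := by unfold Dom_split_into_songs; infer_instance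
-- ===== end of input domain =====

-- B replaces A's accumulator-threading pass by a segment-then-filter decomposition
-- (strip once, split at '*'-lines, keep the non-blank lines of each non-empty run); alternative, same cost.


-- ===== PORT A =====
-- literal transliteration of A: one fold threading (songs, current_song), final flush
def split_into_songs (lines : List String) : List (List String) :=
  let st := lines.foldl
    (fun (acc : List (List String) × List String) line =>
      if PySem.Str.isIn "*" (PySem.Str.strip line) then
        if acc.2 ≠ [] then (acc.1 ++ [acc.2], []) else acc
      else
        if PySem.Str.strip line ≠ "" then (acc.1, acc.2 ++ [PySem.Str.strip line]) else acc)
    ([], [])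
  if st.2 ≠ [] then st.1 ++ [st.2] else st.1

-- ===== PORT B =====
-- "*" not in t  (on already-stripped lines)
def pFree (t : String) : Bool := !(PySem.Str.isIn "*" t)

-- Source B's segment scan: the inner while loop computes the split point j
-- (maximal '*'-free prefix), so ls[i:j] = takeWhile pFree, ls[j:] = dropWhile pFree — exact.
def sisSegs : List String → List (List String)
  | [] => []
  | s :: rest =>
    if _h : PySem.Str.isIn "*" s = true then sisSegs rest
    else
      let song := ((s :: rest).takeWhile pFree).filter (fun t => t ≠ "")
      let tail := sisSegs ((s :: rest).dropWhile pFree)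
      if song = [] then tail else song :: tail
termination_by ls => ls.length
decreasing_by
  · simp
  · simp only [List.dropWhile_cons, pFree, _h, Bool.not_false, if_true]
    exact Nat.lt_succ_of_le (List.length_dropWhile_le _ _)

def split_into_songs_alt (lines : List String) : List (List String) :=
  sisSegs (lines.map (fun l => PySem.Str.strip l))

-- ===== PRECONDITION & SPEC =====
def Spec_split_into_songs (lines : List String) (out : List (List String)) : Prop := out = split_into_songs_alt lines
instance (lines : List String) (out : List (List String)) : Decidable (Spec_split_into_songs lines out) := by unfold Spec_split_into_songs; infer_instance

-- ===== CLAIM (what is proved, stated in full; the proofs are below) =====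
def Claim_equal_split_into_songs : Prop := ∀ (lines : List String), Dom_split_into_songs lines → Spec_split_into_songs lines (split_into_songs lines)

-- ===== LEMMAS AND PROOFS =====

-- recursive rendering of A's loop over the already-stripped lines
def sisG (cur : List String) : List String → List (List String)
  | [] => if cur = [] then [] else [cur]
  | s :: rest =>
    if PySem.Str.isIn "*" s then
      if cur = [] then sisG [] rest else cur :: sisG [] rest
    else if s = "" then sisG cur rest
    else sisG (cur ++ [s]) rest

-- A's step over a stripped line
def sisStep (acc : List (List String) × List String) (s : String) : List (List String) × List String :=
  if PySem.Str.isIn "*" s then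
    if acc.2 ≠ [] then (acc.1 ++ [acc.2], []) else acc
  else
    if s ≠ "" then (acc.1, acc.2 ++ [s]) else acc

theorem sisG_loop (ls : List String) : ∀ songs cur,
    (let st := ls.foldl sisStep (songs, cur);
     if st.2 ≠ [] then st.1 ++ [st.2] else st.1) = songs ++ sisG cur ls := by
  induction ls with
  | nil =>
    intro songs cur
    simp only [List.foldl_nil, sisG]
    by_cases h : cur = [] <;> simp [h]
  | cons s rest ih =>
    intro songs cur
    simp only [List.foldl_cons, sisG, sisStep]
    by_cases hstar : PySem.Chars.isIn ['*'] s.toList = true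
    · by_cases hc : cur = []
      · simp [hstar, hc, ih]
      · simp [hstar, hc, ih]
    · by_cases hb : s = ""
      · simp [hb, ih, show PySem.Chars.isIn ['*'] ([] : List Char) = false from by decide]
      · simp [hstar, hb, ih]

-- one-step characterisation of sisSegs
theorem sisSegs_char (ls : List String) :
    sisSegs ls =
      (if (ls.takeWhile pFree).filter (fun t => t ≠ "") = []
       then sisSegs (ls.dropWhile pFree)
       else ((ls.takeWhile pFree).filter (fun t => t ≠ "")) :: sisSegs (ls.dropWhile pFree)) := by
  match ls with
  | [] => simp
  | s :: rest =>
    by_cases hstar : PySem.Chars.isIn ['*'] s.toList = true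
    · have hp : pFree s = false := by simp [pFree, hstar]
      have hS : sisSegs (s :: rest) = sisSegs rest := by rw [sisSegs]; simp [hstar]
      simp [hp, hS]
    · have hp : pFree s = true := by simp [pFree, hstar]
      rw [sisSegs]
      simp only [List.takeWhile_cons, List.dropWhile_cons, hp, if_true]
      rw [dif_neg (by simpa using hstar)]

theorem sisG_cons (cur : List String) (s : String) (rest : List String) :
    sisG cur (s :: rest) =
      if PySem.Str.isIn "*" s then (if cur = [] then sisG [] rest else cur :: sisG [] rest)
      else if s = "" then sisG cur rest
      else sisG (cur ++ [s]) rest := rfl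

theorem sisG_eq_segs (ls : List String) : ∀ cur,
    sisG cur ls =
      (if cur ++ (ls.takeWhile pFree).filter (fun t => t ≠ "") = [] then
        sisSegs (ls.dropWhile pFree)
       else (cur ++ (ls.takeWhile pFree).filter (fun t => t ≠ "")) :: sisSegs (ls.dropWhile pFree)) := by
  induction ls with
  | nil =>
    intro cur
    by_cases hc : cur = [] <;> simp [sisG, hc, sisSegs]
  | cons s rest ih =>
    intro cur
    rw [sisG_cons, List.takeWhile_cons, List.dropWhile_cons]
    by_cases hstar : PySem.Str.isIn "*" s = true
    · have hp : pFree s = false := by simp [pFree]; simpa using hstar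
      have hG : sisG [] rest = sisSegs rest := by
        rw [ih [], List.nil_append, ← sisSegs_char]
      have hS : sisSegs (s :: rest) = sisSegs rest := by
        rw [sisSegs]; simp [show PySem.Chars.isIn ['*'] s.toList = true from by simpa using hstar]
      rw [if_pos hstar, hp]
      simp only [Bool.false_eq_true, if_false, List.filter_nil, List.append_nil, hS, hG]
    · have hp : pFree s = true := by simp [pFree]; simpa using hstar
      rw [if_neg hstar, hp, if_pos rfl]
      by_cases hb : s = ""
      · rw [if_pos hb, ih cur, hb]
        simp
      · rw [if_neg hb, ih (cur ++ [s])]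
        have hfil : List.filter (fun t => decide (t ≠ "")) (s :: rest.takeWhile pFree)
             = s :: List.filter (fun t => decide (t ≠ "")) (rest.takeWhile pFree) := by
          simp [hb]
        rw [hfil]
        simp [List.append_assoc]

-- ===== VERDICT (by name: the statement is the Claim_ definition above) =====
theorem split_into_songs_spec : Claim_equal_split_into_songs := by
  intro lines _
  unfold Spec_split_into_songs split_into_songs split_into_songs_alt
  rw [show (lines.foldl
      (fun (acc : List (List String) × List String) line =>
        if PySem.Str.isIn "*" (PySem.Str.strip line) then
          if acc.2 ≠ [] then (acc.1 ++ [acc.2], []) else acc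
        else
          if PySem.Str.strip line ≠ "" then (acc.1, acc.2 ++ [PySem.Str.strip line]) else acc)
      ([], []))
      = (lines.map (fun l => PySem.Str.strip l)).foldl sisStep ([], []) from by
    rw [List.foldl_map]; rfl]
  have h := sisG_loop (lines.map (fun l => PySem.Str.strip l)) [] []
  simp only [List.nil_append] at h
  rw [h, sisG_eq_segs, List.nil_append, ← sisSegs_char]
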